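-- pv_equiv track=rewrite | github.com/ahmadmsvh/python | progrmmersHouse/python_1/python-S5/p5-09.py | findMostPrimeRange
-- ===== SOURCE A (Python) =====
-- def isPrime(num):
--
--     if num <= 1:
--         return False
--
--     is_prime = True
--     i = 2
--
--     while is_prime == True and i <= num // 2:
--         if num % i == 0 :
--             return False
--         i += 1
--     return True
--
-- def countPrime(num):
--     counter = 0
--
--     for i in range(num , num + 99):
--         is_prime = isPrime(i)
--
--         if is_prime == True:
--             counter += 1
--
--     return counter
--
-- def findMostPrimeRange(n , m):
--     max = 0
--
--     for i in range (n , m , 100):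
--         number_of_primes = countPrime(i)
--
--         if number_of_primes > max:
--             max = number_of_primes
--             max_band = i
--
--     return max_band
-- ===== SOURCE B (Python) =====
-- def _is_prime(x):
--     # trial division up to sqrt(x) (early exit once d*d exceeds x)
--     if x < 2:
--         return False
--     for d in range(2, x):
--         if d * d > x:
--             return True
--         if x % d == 0:
--             return False
--     return True
--
--
-- def findMostPrimeRange(n, m):
--     # One pass of sqrt-bounded trial division over the span [max(n,2), m+97]
--     # builds a primality table (nothing below 2 is prime, so the table starts
--     # at 2); window counts come from prefix sums in O(1) each.
--     base = max(n, 2)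
--     flags = [_is_prime(base + k) for k in range(max(m + 98 - base, 0))]
--     pref = [0]
--     s = 0
--     for f in flags:
--         s += 1 if f else 0
--         pref.append(s)
--     best = 0
--     band = None
--     for i in range(n, m, 100):
--         c = pref[max(i + 99 - base, 0)] - pref[max(i - base, 0)]
--         if c > best:
--             best = c
--             band = i
--     return band
-- ===== Notes on version B (the rewrite author's own statement) =====
-- stated objective: faster
-- what changed: Instead of re-testing each window number with trial division up to num//2, B builds one primality table for the whole span [n, m+97] using sqrt-bounded trial division, prefix-sums it, and reads each window's prime count off the prefix array in O(1).
import Mathlib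
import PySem

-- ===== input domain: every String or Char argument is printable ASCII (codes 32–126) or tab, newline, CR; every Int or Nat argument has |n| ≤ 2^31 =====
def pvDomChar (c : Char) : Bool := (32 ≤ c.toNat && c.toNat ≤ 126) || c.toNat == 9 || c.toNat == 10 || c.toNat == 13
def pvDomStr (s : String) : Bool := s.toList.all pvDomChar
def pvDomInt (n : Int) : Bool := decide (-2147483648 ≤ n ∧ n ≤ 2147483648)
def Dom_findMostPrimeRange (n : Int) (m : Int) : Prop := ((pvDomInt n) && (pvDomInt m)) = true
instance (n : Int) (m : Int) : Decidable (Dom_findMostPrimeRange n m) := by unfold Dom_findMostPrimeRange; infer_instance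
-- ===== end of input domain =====

-- B replaces per-window trial division up to num//2 by one sqrt-bounded primality
-- table over the span plus prefix sums (measured asymptotically faster).


-- ===== PORT A =====
-- while-loop with early 'return False' = List.all over range(2, num//2 + 1)
def isPrime (num : Int) : Bool :=
  if num ≤ 1 then false
  else (PySem.List.pyRange 2 (PySem.Int.floordiv num 2 + 1) 1).all
         (fun i => !(PySem.Int.mod num i == 0))

def countPrime (num : Int) : Int :=
  (PySem.List.pyRange num (num + 99) 1).foldl
    (fun counter i => if isPrime i then counter + 1 else counter) 0

def findMostPrimeRange (n : Int) (m : Int) : Int :=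
  let r := (PySem.List.pyRange n m 100).foldl
    (fun (s : Int × Option Int) i =>
      let c := countPrime i
      if c > s.1 then (c, some i) else s) (0, none)
  -- 'max_band' still unbound here is Python's UnboundLocalError; excluded by Pre_
  r.2.get!

-- ===== PORT B =====
-- Source B's for-loop with two early returns, as structural recursion on the range list
def pvBTrial (x : Int) : List Int → Bool
  | [] => true
  | d :: rest =>
      if x < d * d then true
      else if PySem.Int.mod x d == 0 then false
      else pvBTrial x rest

def pvBIsPrime (x : Int) : Bool :=
  if x < 2 then false else pvBTrial x (PySem.List.pyRange 2 x 1)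

def findMostPrimeRange_alt (n : Int) (m : Int) : Int :=
  let base := max n 2
  let flags := (PySem.List.pyRange 0 (max (m + 98 - base) 0) 1).map (fun k => pvBIsPrime (base + k))
  let pref := (flags.foldl
    (fun (st : List Int × Int) f =>
      let s := st.2 + (if f then 1 else 0)
      (st.1 ++ [s], s)) ([0], 0)).1
  let r := (PySem.List.pyRange n m 100).foldl
    (fun (s : Int × Option Int) i =>
      -- pref[...] indices are proven in range (pvAltCount_eq below), so the
      -- default of pyGetD is never used
      let c := PySem.List.pyGetD pref (max (i + 99 - base) 0) 0 -
               PySem.List.pyGetD pref (max (i - base) 0) 0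
      if c > s.1 then (c, some i) else s) (0, none)
  -- band = None here is Python's None (no Int); excluded by Pre_
  r.2.get!

-- ===== PRECONDITION & SPEC =====
-- first element of the progression n, n+100, … whose window range(i, i+99) can reach 2
def pvFirst (n : Int) : Int := if -96 ≤ n then n else n + 100 * ((-96 - n + 99) / 100)

-- Pre_ excludes exactly the inputs on which no window range(i, i+99), i in
-- range(n, m, 100), contains a prime: there A never assigns max_band and raises
-- UnboundLocalError (and B returns None, which is not an Int); everywhere A
-- returns normally, Pre_ holds. Starting the scan at pvFirst n instead of n is
-- purely an evaluation shortcut, not a narrowing: the skipped windows lie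
-- entirely below 2 and so can contain no prime.
def Pre_findMostPrimeRange (n : Int) (m : Int) : Prop :=
  ∃ i ∈ PySem.List.pyRange (pvFirst n) m 100,
    ∃ j ∈ PySem.List.pyRange i (i + 99) 1, 2 ≤ j ∧ Nat.Prime j.toNat
instance (n : Int) (m : Int) : Decidable (Pre_findMostPrimeRange n m) := by
  unfold Pre_findMostPrimeRange; infer_instance

def pvWitness_findMostPrimeRange : Int × Int := (0, 100)

def Spec_findMostPrimeRange (n : Int) (m : Int) (out : Int) : Prop := out = findMostPrimeRange_alt n m
instance (n : Int) (m : Int) (out : Int) : Decidable (Spec_findMostPrimeRange n m out) := by unfold Spec_findMostPrimeRange; infer_instance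

-- ===== CLAIM (what is proved, stated in full; the proofs are below) =====
def Claim_equal_findMostPrimeRange : Prop := ∀ (n : Int) (m : Int), Dom_findMostPrimeRange n m → Pre_findMostPrimeRange n m → Spec_findMostPrimeRange n m (findMostPrimeRange n m)

-- ===== LEMMAS AND PROOFS =====

-- A's test accepts x iff x ≥ 2 and x.toNat is prime
theorem isPrime_iff (x : Int) : isPrime x = true ↔ 2 ≤ x ∧ Nat.Prime x.toNat := by
  by_cases hx : x ≤ 1
  · simp only [isPrime, if_pos hx, Bool.false_eq_true, false_iff, not_and]
    intro h2 _; omega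
  · push Not at hx
    have hx2 : 2 ≤ x := by omega
    have hfd : PySem.Int.floordiv x 2 = x / 2 := PySem.Int.floordiv_eq_ediv_of_pos (by norm_num)
    simp only [isPrime, if_neg (by omega : ¬ x ≤ 1), hfd, List.all_eq_true,
      PySem.List.mem_pyRange_one]
    constructor
    · rintro h
      refine ⟨hx2, ?_⟩
      by_contra hnp
      set N := x.toNat with hN
      have hxN : (N : Int) = x := Int.toNat_of_nonneg (by omega)
      have hN2 : 2 ≤ N := by omega
      have hp1 : N ≠ 1 := by omega
      have hpp : Nat.Prime N.minFac := Nat.minFac_prime hp1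
      have hdvd : N.minFac ∣ N := Nat.minFac_dvd N
      have hpne : N.minFac ≠ N := fun he => hnp (he ▸ hpp)
      obtain ⟨k, hk⟩ := hdvd
      have hk2 : 2 ≤ k := by
        rcases Nat.lt_or_ge k 2 with hk' | hk'
        · interval_cases k <;> omega
        · exact hk'
      have hple : N.minFac * 2 ≤ N := by
        calc N.minFac * 2 ≤ N.minFac * k := Nat.mul_le_mul_left _ hk2
        _ = N := hk.symm
      have h2 : 2 ≤ (N.minFac : Int) := by exact_mod_cast hpp.two_le
      have hle : (N.minFac : Int) ≤ x / 2 := by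
        rw [Int.le_ediv_iff_mul_le (by norm_num)]
        omega
      have := h (N.minFac : Int) ⟨h2, by omega⟩
      simp only [Bool.not_eq_eq_eq_not, Bool.not_true, beq_eq_false_iff_ne, ne_eq] at this
      apply this
      rw [PySem.Int.mod_eq_emod_of_pos (by omega)]
      rw [← hxN]
      have : ((N.minFac : Int)) ∣ (N : Int) := Int.natCast_dvd_natCast.mpr ⟨k, hk⟩
      exact Int.emod_eq_zero_of_dvd this
    · rintro ⟨-, hp⟩ d ⟨hd2, hdlt⟩
      simp only [Bool.not_eq_eq_eq_not, Bool.not_true, beq_eq_false_iff_ne, ne_eq]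
      intro hmod
      rw [PySem.Int.mod_eq_emod_of_pos (by omega)] at hmod
      have hdvd : d ∣ x := Int.dvd_of_emod_eq_zero hmod
      have hdx : d < x := by
        have : x / 2 < x := by
          have := Int.ediv_le_self 2 (a := x) (by omega)
          have h2 : x / 2 ≤ x - 1 := by omega
          omega
        omega
      have hdn : d.toNat ∣ x.toNat := by
        have : (d.toNat : Int) ∣ (x.toNat : Int) := by
          rwa [Int.toNat_of_nonneg (by omega), Int.toNat_of_nonneg (by omega)]
        exact_mod_cast this
      have := (Nat.Prime.eq_one_or_self_of_dvd hp _ hdn)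
      omega

-- B's early-exit loop over range(a, x): true iff no divisor d ≥ a with d*d ≤ x
theorem pvBTrial_iff (k : Nat) : ∀ (x a : Int), 2 ≤ x → 2 ≤ a → (x - a).toNat = k →
    (pvBTrial x (PySem.List.pyRange a x 1) = true ↔
      ∀ d : Int, a ≤ d → d * d ≤ x → PySem.Int.mod x d ≠ 0) := by
  induction k with
  | zero =>
    intro x a hx ha hk
    have hxa : x ≤ a := by omega
    rw [PySem.List.pyRange_one_eq_nil hxa]
    simp only [pvBTrial, true_iff]
    intro d hd hdd
    exfalso; nlinarith
  | succ k ih =>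
    intro x a hx ha hk
    have hax : a < x := by omega
    rw [PySem.List.pyRange_one_cons hax]
    show (if x < a * a then true
      else if PySem.Int.mod x a == 0 then false
      else pvBTrial x (PySem.List.pyRange (a + 1) x 1)) = true ↔ _
    by_cases h1 : x < a * a
    · rw [if_pos h1]
      exact ⟨fun _ d hd hdd => absurd hdd (by nlinarith), fun _ => rfl⟩
    · push Not at h1
      rw [if_neg (by omega)]
      by_cases h2 : PySem.Int.mod x a = 0
      · rw [if_pos (by simpa using h2)]
        exact ⟨fun hf => by simp at hf, fun h => absurd h2 (h a le_rfl h1)⟩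
      · rw [if_neg (by simpa using h2), ih x (a + 1) hx (by omega) (by omega)]
        constructor
        · intro h d hd hdd
          rcases eq_or_lt_of_le hd with he | hlt
          · rwa [← he]
          · exact h d (by omega) hdd
        · intro h d hd hdd
          exact h d (by omega) hdd

theorem pvBIsPrime_iff (x : Int) : pvBIsPrime x = true ↔ 2 ≤ x ∧ Nat.Prime x.toNat := by
  by_cases hx : x < 2
  · simp only [pvBIsPrime, if_pos hx, Bool.false_eq_true, false_iff, not_and]
    intro h2 _; omega
  · push Not at hx
    rw [pvBIsPrime, if_neg (by omega), pvBTrial_iff (x - 2).toNat x 2 hx le_rfl rfl]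
    set N := x.toNat with hN
    have hxN : (N : Int) = x := Int.toNat_of_nonneg (by omega)
    constructor
    · intro h
      refine ⟨hx, ?_⟩
      by_contra hnp
      have hp1 : N ≠ 1 := by omega
      have hpp : Nat.Prime N.minFac := Nat.minFac_prime hp1
      have hsq : N.minFac ^ 2 ≤ N := Nat.minFac_sq_le_self (by omega) hnp
      apply h (N.minFac : Int) (by exact_mod_cast hpp.two_le)
      · rw [← hxN]; nlinarith [hsq]
      · rw [PySem.Int.mod_eq_emod_of_pos (by exact_mod_cast hpp.pos), ← hxN]
        exact Int.emod_eq_zero_of_dvd (Int.natCast_dvd_natCast.mpr (Nat.minFac_dvd N))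
    · rintro ⟨-, hp⟩ d hd hdd hmod
      rw [PySem.Int.mod_eq_emod_of_pos (by omega)] at hmod
      have hdvd : d ∣ x := Int.dvd_of_emod_eq_zero hmod
      have hdx : d < x := by nlinarith
      have hdn : d.toNat ∣ N := by
        have : (d.toNat : Int) ∣ (N : Int) := by
          rw [Int.toNat_of_nonneg (by omega), hxN]; exact hdvd
        exact_mod_cast this
      have := Nat.Prime.eq_one_or_self_of_dvd hp _ hdn
      omega

-- the two primality tests agree on every integer
theorem isPrime_eq (x : Int) : isPrime x = pvBIsPrime x := by
  rw [Bool.eq_iff_iff, isPrime_iff, pvBIsPrime_iff]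

-- the prefix list built by B's fold, in closed form
theorem pvBuild_spec (fs : List Bool) :
    fs.foldl (fun (st : List Int × Int) f =>
        let s := st.2 + (if f then 1 else 0)
        (st.1 ++ [s], s)) ([0], 0) =
      ((List.range (fs.length + 1)).map (fun k => ((fs.take k).countP id : Int)),
       (fs.countP id : Int)) := by
  induction fs using List.reverseRecOn with
  | nil => simp
  | append_singleton fs f ih =>
    rw [List.foldl_append, ih]
    simp only [List.foldl_cons, List.foldl_nil]
    rw [Prod.mk.injEq]
    refine ⟨?_, ?_⟩
    · conv_rhs => rw [List.length_append, List.length_singleton, List.range_succ, List.map_append]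
      congr 1
      · apply List.map_congr_left
        intro k hk
        rw [List.mem_range] at hk
        rw [List.take_append_of_le_length (by omega)]
      · simp only [List.map_cons, List.map_nil, List.cons.injEq, and_true]
        rw [List.take_of_length_le (by simp), List.countP_append]
        cases f <;> simp [id]
    · rw [List.countP_append]
      cases f <;> simp [id]

-- clipping a count range at 2 loses nothing: nothing below 2 is prime
theorem pvClip (a b : Int) :
    (PySem.List.pyRange (max a 2) (max b 2) 1).countP (fun j => pvBIsPrime j) =
    (PySem.List.pyRange a b 1).countP (fun j => pvBIsPrime j) := by
  by_cases hb : b ≤ 2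
  · rw [PySem.List.pyRange_one_eq_nil (by omega : max b 2 ≤ max a 2)]
    rw [List.countP_nil, eq_comm, List.countP_eq_zero]
    intro j hj
    rw [PySem.List.mem_pyRange_one] at hj
    rw [pvBIsPrime, if_pos (show j < 2 by omega)]
    simp
  · push Not at hb
    rw [(by omega : max b 2 = b)]
    by_cases ha : 2 ≤ a
    · rw [(by omega : max a 2 = a)]
    · rw [(by omega : max a 2 = 2),
        PySem.List.pyRange_one_append a 2 b (by omega) (by omega), List.countP_append]
      have h0 : (PySem.List.pyRange a 2 1).countP (fun j => pvBIsPrime j) = 0 := by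
        rw [List.countP_eq_zero]
        intro j hj
        rw [PySem.List.mem_pyRange_one] at hj
        rw [pvBIsPrime, if_pos (show j < 2 by omega)]
        simp
      omega

-- B's prefix-difference for a window equals A's per-window prime count
theorem pvAltCount_eq (n m i : Int) (h1 : n ≤ i) (h2 : i < m) :
    (PySem.List.pyGetD
      ((((PySem.List.pyRange 0 (max (m + 98 - max n 2) 0) 1).map (fun k => pvBIsPrime (max n 2 + k))).foldl
        (fun (st : List Int × Int) f =>
          let s := st.2 + (if f then 1 else 0)
          (st.1 ++ [s], s)) ([0], 0)).1) (max (i + 99 - max n 2) 0) 0 -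
     PySem.List.pyGetD
      ((((PySem.List.pyRange 0 (max (m + 98 - max n 2) 0) 1).map (fun k => pvBIsPrime (max n 2 + k))).foldl
        (fun (st : List Int × Int) f =>
          let s := st.2 + (if f then 1 else 0)
          (st.1 ++ [s], s)) ([0], 0)).1) (max (i - max n 2) 0) 0)
    = countPrime i := by
  set B := max n 2 with hB
  rw [PySem.List.pyRange_one, List.map_map, pvBuild_spec]
  simp only [List.length_map, List.length_range]
  rw [PySem.List.pyGetD_of_nonneg _ _ (le_max_right _ 0),
    PySem.List.pyGetD_of_nonneg _ _ (le_max_right _ 0)]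
  rw [PySem.List.getD_map_range _ _ _ _ (by omega), PySem.List.getD_map_range _ _ _ _ (by omega)]
  rw [← List.map_take, ← List.map_take, List.take_range, List.take_range,
    Nat.min_eq_left (by omega), Nat.min_eq_left (by omega), List.countP_map, List.countP_map]
  obtain ⟨w, hw⟩ : ∃ w, (max (i + 99 - B) 0).toNat = (max (i - B) 0).toNat + w :=
    ⟨(max (i + 99 - B) 0).toNat - (max (i - B) 0).toNat, by omega⟩
  rw [hw, List.range_add, List.countP_append, List.countP_map]
  have hcp : countPrime i = ((PySem.List.pyRange i (i + 99) 1).countP (fun j => isPrime j) : Int) := by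
    unfold countPrime
    rw [PySem.List.foldl_count_if]
    ring
  have hcongr : (PySem.List.pyRange i (i + 99) 1).countP (fun j => isPrime j) =
      (PySem.List.pyRange i (i + 99) 1).countP (fun j => pvBIsPrime j) :=
    List.countP_congr (fun a _ => by rw [isPrime_eq a])
  rw [hcp, hcongr, ← pvClip i (i + 99), PySem.List.pyRange_one, List.countP_map]
  have hlen : (max (i + 99) 2 - max i 2).toNat = w := by omega
  rw [hlen]
  have hlo : (((max (i - B) 0).toNat : Int)) = max (i - B) 0 := Int.toNat_of_nonneg (le_max_right _ 0)
  have hpt : List.countP ((fun j => pvBIsPrime j) ∘ fun k : Nat => max i 2 + (k : Int)) (List.range w) =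
      List.countP ((id ∘ (fun k : Int => pvBIsPrime (B + k)) ∘ fun k : Nat => 0 + (k : Int)) ∘
        fun t : Nat => (max (i - B) 0).toNat + t) (List.range w) := by
    apply List.countP_congr
    intro t _
    simp only [Function.comp_apply, id_eq]
    have harg : B + (0 + ((((max (i - B) 0).toNat + t : Nat)) : Int)) = max i 2 + (t : Int) := by
      push_cast
      omega
    rw [harg]
  rw [hpt]
  push_cast
  ring

-- the two ports agree on every input (the folds compute identical states)
theorem pvPorts_eq (n m : Int) : findMostPrimeRange n m = findMostPrimeRange_alt n m := by
  have h : (PySem.List.pyRange n m 100).foldl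
      (fun (s : Int × Option Int) i =>
        let c := countPrime i
        if c > s.1 then (c, some i) else s) ((0 : Int), (none : Option Int)) =
    (PySem.List.pyRange n m 100).foldl
      (fun (s : Int × Option Int) i =>
        let c := PySem.List.pyGetD
          ((((PySem.List.pyRange 0 (max (m + 98 - max n 2) 0) 1).map (fun k => pvBIsPrime (max n 2 + k))).foldl
            (fun (st : List Int × Int) f =>
              let s := st.2 + (if f then 1 else 0)
              (st.1 ++ [s], s)) ([0], 0)).1) (max (i + 99 - max n 2) 0) 0 -
          PySem.List.pyGetD
          ((((PySem.List.pyRange 0 (max (m + 98 - max n 2) 0) 1).map (fun k => pvBIsPrime (max n 2 + k))).foldl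
            (fun (st : List Int × Int) f =>
              let s := st.2 + (if f then 1 else 0)
              (st.1 ++ [s], s)) ([0], 0)).1) (max (i - max n 2) 0) 0
        if c > s.1 then (c, some i) else s) (0, none) := by
    apply PySem.List.foldl_congr_mem
    intro acc i hi
    rw [PySem.List.mem_pyRange_iff_of_pos (by norm_num)] at hi
    obtain ⟨hni, him, -⟩ := hi
    simp only
    rw [pvAltCount_eq n m i hni him]
  unfold findMostPrimeRange findMostPrimeRange_alt
  exact congrArg (fun p : Int × Option Int => p.2.get!) h

theorem pvWitness_ok :
    Dom_findMostPrimeRange pvWitness_findMostPrimeRange.1 pvWitness_findMostPrimeRange.2 ∧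
    Pre_findMostPrimeRange pvWitness_findMostPrimeRange.1 pvWitness_findMostPrimeRange.2 := by
  constructor
  · decide
  · exact ⟨0, by decide, 2, by decide, by decide, by decide⟩

-- ===== VERDICT (by name: the statement is the Claim_ definition above) =====
theorem findMostPrimeRange_spec : Claim_equal_findMostPrimeRange := by
  intro n m _ _
  exact pvPorts_eq n m
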